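-- pv_equiv track=rewrite | github.com/PAvonK/Python_Fundamentals | 214_Biggest.py | biggest
-- ===== SOURCE A (Python) =====
-- def biggest(aDict):                     # Sets Function
--     '''
--     aDict: A dictionary, where all the values are lists.
--
--     returns: The key with the largest number of values associated with it
--     '''
--     # Your Code Here
--     result = None                       # begins with a result of None
--     maxNum = 0                          # Used to count the values
--
--     for key in aDict.keys():            # Sets a for loop key through dict keys
--         if len(aDict[key]) >= maxNum:   # Determines if value length is greater...
--                                         #... than previous maxNum
--             result = key                # If it is, the result changes to key
--             maxNum = len(aDict[key])    # maxNum is changed to new variable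
--     return result                       # Returns the result
-- ===== SOURCE B (Python) =====
-- def biggest(aDict):
--     if not aDict:
--         return None
--     m = max(len(v) for v in aDict.values())
--     for k, v in reversed(aDict.items()):
--         if len(v) == m:
--             return k
-- ===== Notes on version B (the rewrite author's own statement) =====
-- stated objective: alternative
-- what changed: Replaces A's single forward pass that keeps a running (result, maxNum) pair updated by a >= test with a two-phase computation: take the maximum value-list length over the dict, then scan the keys in reverse and return the first key whose list has that length (reproducing A's last-among-ties choice).
import Mathlib
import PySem

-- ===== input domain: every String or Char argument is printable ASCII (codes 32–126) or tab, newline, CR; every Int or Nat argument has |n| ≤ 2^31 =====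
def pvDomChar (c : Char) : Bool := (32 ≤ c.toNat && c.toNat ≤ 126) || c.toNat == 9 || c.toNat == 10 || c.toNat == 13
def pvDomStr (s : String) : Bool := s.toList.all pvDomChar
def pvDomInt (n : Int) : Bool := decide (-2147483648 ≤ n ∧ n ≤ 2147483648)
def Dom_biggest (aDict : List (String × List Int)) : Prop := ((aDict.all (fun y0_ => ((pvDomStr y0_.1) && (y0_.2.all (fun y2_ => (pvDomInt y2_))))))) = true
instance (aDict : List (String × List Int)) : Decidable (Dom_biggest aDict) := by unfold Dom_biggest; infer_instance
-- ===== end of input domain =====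

-- B replaces A's running (result, maxNum) forward scan by max-of-lengths + reverse search; same cost, different decomposition.

-- ===== PORT A =====
-- result = None; maxNum = 0; for key in aDict.keys(): if len(aDict[key]) >= maxNum: result, maxNum = key, len(...)
-- (the dict parameter arrives as an association list; Python's dict(pairs) is PySem.Dict.ofList)
def biggestStep (s : Option String × Int) (kv : String × List Int) : Option String × Int :=
  if (kv.2.length : Int) ≥ s.2 then (some kv.1, (kv.2.length : Int)) else s

def biggest (aDict : List (String × List Int)) : Option String :=
  ((PySem.Dict.ofList aDict).items.foldl biggestStep (none, 0)).1

-- ===== PORT B =====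
-- if not aDict: None; m = max(len(v) for v in values()); first key with len(v) == m scanning items in reverse
def biggest_alt (aDict : List (String × List Int)) : Option String :=
  let items := (PySem.Dict.ofList aDict).items
  if items = [] then none
  else
    let m := (items.map (fun kv => kv.2.length)).foldl Nat.max 0
    (items.reverse.find? (fun kv => kv.2.length == m)).map (·.1)

-- ===== PRECONDITION & SPEC =====
def Spec_biggest (aDict : List (String × List Int)) (out : Option String) : Prop := out = biggest_alt aDict
instance (aDict : List (String × List Int)) (out : Option String) : Decidable (Spec_biggest aDict out) := by unfold Spec_biggest; infer_instance

-- ===== CLAIM (what is proved, stated in full; the proofs are below) =====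
def Claim_equal_biggest : Prop := ∀ (aDict : List (String × List Int)), Dom_biggest aDict → Spec_biggest aDict (biggest aDict)

-- ===== LEMMAS AND PROOFS =====

-- A's loop state over ANY pair list l equals (B's reverse search, max of lengths).
theorem biggest_loop_char (l : List (String × List Int)) :
    l.foldl biggestStep (none, 0) =
      ((l.reverse.find? (fun kv => kv.2.length == (l.map (fun kv => kv.2.length)).foldl Nat.max 0)).map (·.1),
       (((l.map (fun kv => kv.2.length)).foldl Nat.max 0 : Nat) : Int)) := by
  induction l using List.reverseRecOn with
  | nil => simp
  | append_singleton l kv ih =>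
    by_cases h : (l.map (fun kv => kv.2.length)).foldl Nat.max 0 ≤ kv.2.length
    · have hmax : ((l.map (fun kv => kv.2.length)).foldl Nat.max 0).max kv.2.length
          = kv.2.length := Nat.max_eq_right h
      simp [List.foldl_append, ih, biggestStep, h]
    · have hmax : ((l.map (fun kv => kv.2.length)).foldl Nat.max 0).max kv.2.length
          = (l.map (fun kv => kv.2.length)).foldl Nat.max 0 := Nat.max_eq_left (by omega)
      have hne : (kv.2.length == (l.map (fun kv => kv.2.length)).foldl Nat.max 0) = false := by
        simp; omega
      simp [List.foldl_append, ih, biggestStep, h, hmax, hne]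

-- ===== VERDICT (by name: the statement is the Claim_ definition above) =====
theorem biggest_spec : Claim_equal_biggest := by
  intro aDict _
  unfold Spec_biggest biggest biggest_alt
  rw [biggest_loop_char]
  rcases h : (PySem.Dict.ofList aDict).items with _ | ⟨kv, rest⟩ <;> simp
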